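-- pv_equiv track=rewrite | github.com/hwmaltby/project-euler | problem_50.py | sum_of_most_primes
-- ===== SOURCE A (Python) =====
-- def sieve(n):
--     is_prime = [True] * n
--     is_prime[0], is_prime[1] = False, False
--     prms = []
--     for i in range(2, n):
--         if is_prime[i]:
--             prms.append(i)
--             for j in range(i*i, n, i):
--                 is_prime[j] = False
--     return prms
--
-- def sum_of_most_primes(n):
--     """
--     Returns the prime <= n that can be written as the sum of the
--     greatest number of consecutive primes. Assume n >= 92951.
--     """
--     prms = sieve(n)
--     prms_set = set(prms)
--     prm, num = 92951, 183
--     for i in range(len(prms)):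
--         total, count = 0, 0
--         while total < n:
--             if i + count >= len(prms):
--                 total = n
--             else:
--                 total += prms[i + count]
--                 count += 1
--                 if count > num and total in prms_set:
--                     prm, num = total, count
--     return prm
-- ===== SOURCE B (Python) =====
-- def sieve(n):
--     is_prime = [True] * n
--     is_prime[0], is_prime[1] = False, False
--     prms = []
--     for i in range(2, n):
--         if is_prime[i]:
--             prms.append(i)
--             for j in range(i*i, n, i):
--                 is_prime[j] = False
--     return prms
--
-- def sum_of_most_primes(n):
--     """
--     Returns the prime <= n that can be written as the sum of the
--     greatest number of consecutive primes. Assume n >= 92951.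
--     """
--     prms = sieve(n)
--     prms_set = set(prms)
--     L = len(prms)
--     S = [0]
--     for p in prms:
--         S.append(S[-1] + p)
--     prm, num = 92951, 183
--     for i in range(L):
--         c = num + 1
--         while i + c <= L and S[i + c] - S[i] < n:
--             t = S[i + c] - S[i]
--             if t in prms_set:
--                 prm, num = t, c
--             c += 1
--     return prm
-- ===== Notes on version B (the rewrite author's own statement) =====
-- stated objective: faster
-- what changed: B precomputes a prefix-sum array of the primes so each window sum is one subtraction and, per start index, only window lengths that could beat the current best are examined, instead of A's re-accumulation of primes from every start index until the running total exceeds n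
import Mathlib
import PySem

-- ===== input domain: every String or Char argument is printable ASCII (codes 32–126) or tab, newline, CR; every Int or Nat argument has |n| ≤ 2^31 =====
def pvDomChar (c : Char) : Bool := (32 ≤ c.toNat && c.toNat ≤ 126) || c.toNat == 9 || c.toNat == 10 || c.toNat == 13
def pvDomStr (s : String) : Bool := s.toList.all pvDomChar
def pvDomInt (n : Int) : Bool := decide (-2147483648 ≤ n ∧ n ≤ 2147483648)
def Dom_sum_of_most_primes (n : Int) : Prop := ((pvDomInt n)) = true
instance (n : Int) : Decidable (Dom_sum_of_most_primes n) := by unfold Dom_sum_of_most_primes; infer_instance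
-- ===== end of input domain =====

-- B replaces A's per-start re-accumulation of primes (until the running total exceeds n) by a
-- prefix-sum table giving each window sum in one subtraction, examining only window lengths that
-- could beat the current best; measured moderately faster (both share the sieve's cost).


-- ===== PORT A =====
-- helper `sieve(n)` (module-level helper used verbatim by both Source A and Source B):
-- boolean array, mark multiples, collect primes in order.  For n < 2 Python raises
-- (IndexError); that case is excluded by Pre_ and the port returns [] there.
def pvSieve (n : Int) : List Int :=
  if n < 2 then [] else
  let N := n.toNat
  let isP : Array Bool := ((Array.replicate N true).setIfInBounds 0 false).setIfInBounds 1 false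
  ((List.range' 2 (N - 2)).foldl
    (fun (st : Array Bool × List Int) i =>
      if st.1[i]?.getD false then
        ((List.range' (i * i) ((N - i * i + i - 1) / i) i).foldl
            (fun a j => a.setIfInBounds j false) st.1,
         st.2 ++ [(i : Int)])
      else st)
    (isP, [])).2

-- A's inner `while total < n` loop; fuel is only a totality guard (prms.length + 2 always suffices)
def pvInnerA (n : Int) (prms : List Int) (pset : PySem.Set Int) (i : Nat) :
    Nat → Int → Nat → Int → Nat → Int × Nat
  | 0, _, _, prm, num => (prm, num)
  | fuel + 1, total, count, prm, num =>
    if total < n then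
      if prms.length ≤ i + count then
        pvInnerA n prms pset i fuel n count prm num
      else
        if num < count + 1 ∧ total + prms.getD (i + count) 0 ∈ pset then
          pvInnerA n prms pset i fuel (total + prms.getD (i + count) 0) (count + 1)
            (total + prms.getD (i + count) 0) (count + 1)
        else
          pvInnerA n prms pset i fuel (total + prms.getD (i + count) 0) (count + 1) prm num
    else (prm, num)

def sum_of_most_primes (n : Int) : Int :=
  if n < 2 then 0 else   -- Python raises IndexError inside sieve for n < 2; excluded by Pre_
  let prms := pvSieve n
  let pset := PySem.Set.ofList prms
  ((List.range prms.length).foldl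
    (fun (st : Int × Nat) i => pvInnerA n prms pset i (prms.length + 2) 0 0 st.1 st.2)
    (92951, 183)).1

-- ===== PORT B =====
-- B's inner while loop over candidate lengths c, window sum via prefix sums; fuel is a totality guard
def pvInnerB (n : Int) (L : Nat) (S : List Int) (pset : PySem.Set Int) (i : Nat) :
    Nat → Nat → Int → Nat → Int × Nat
  | 0, _, prm, num => (prm, num)
  | fuel + 1, c, prm, num =>
    if i + c ≤ L ∧ S.getD (i + c) 0 - S.getD i 0 < n then
      if S.getD (i + c) 0 - S.getD i 0 ∈ pset then
        pvInnerB n L S pset i fuel (c + 1) (S.getD (i + c) 0 - S.getD i 0) c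
      else
        pvInnerB n L S pset i fuel (c + 1) prm num
    else (prm, num)

def sum_of_most_primes_alt (n : Int) : Int :=
  if n < 2 then 0 else   -- same sieve helper, same raise for n < 2
  let prms := pvSieve n
  let pset := PySem.Set.ofList prms
  let L := prms.length
  let S := prms.foldl (fun acc p => acc ++ [acc.getLast! + p]) [0]
  ((List.range L).foldl
    (fun (st : Int × Nat) i => pvInnerB n L S pset i (L + 2) (st.2 + 1) st.1 st.2)
    (92951, 183)).1

-- ===== PRECONDITION & SPEC =====
-- Pre_: Python's sieve indexes is_prime[0] and is_prime[1], so A raises IndexError for every n < 2.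
def Pre_sum_of_most_primes (n : Int) : Prop := 2 ≤ n
instance (n : Int) : Decidable (Pre_sum_of_most_primes n) := by unfold Pre_sum_of_most_primes; infer_instance
def pvWitness_sum_of_most_primes : Int := 10

def Spec_sum_of_most_primes (n : Int) (out : Int) : Prop := out = sum_of_most_primes_alt n
instance (n : Int) (out : Int) : Decidable (Spec_sum_of_most_primes n out) := by unfold Spec_sum_of_most_primes; infer_instance

-- ===== CLAIM (what is proved, stated in full; the proofs are below) =====
def Claim_equal_sum_of_most_primes : Prop := ∀ (n : Int), Dom_sum_of_most_primes n → Pre_sum_of_most_primes n → Spec_sum_of_most_primes n (sum_of_most_primes n)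

-- ===== LEMMAS AND PROOFS =====

-- window sum: sum of prms[i], …, prms[i+c-1]
def pvW (prms : List Int) (i c : Nat) : Int := ((prms.drop i).take c).sum

-- running sums (proof model of Source B's S-building loop)
def pvScan (s : Int) : List Int → List Int
  | [] => []
  | p :: rest => (s + p) :: pvScan (s + p) rest

lemma pvSieve_mem_aux (N : Nat) (l : List Nat) :
    ∀ (st : Array Bool × List Int) (p : Int),
      p ∈ (l.foldl
        (fun (st : Array Bool × List Int) i =>
          if st.1[i]?.getD false then
            ((List.range' (i * i) ((N - i * i + i - 1) / i) i).foldl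
                (fun a j => a.setIfInBounds j false) st.1,
             st.2 ++ [(i : Int)])
          else st) st).2 →
      p ∈ st.2 ∨ ∃ i ∈ l, p = (i : Int) := by
  induction l with
  | nil => intro st p hp; exact Or.inl hp
  | cons i rest ih =>
    intro st p hp
    simp only [List.foldl_cons] at hp
    rcases ih _ p hp with h | ⟨j, hj, rfl⟩
    · by_cases hb : st.1[i]?.getD false = true
      · simp only [hb, if_true, List.mem_append, List.mem_singleton] at h
        rcases h with h | rfl
        · exact Or.inl h
        · exact Or.inr ⟨i, List.mem_cons_self, rfl⟩
      · simp only [hb] at h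
        exact Or.inl h
    · exact Or.inr ⟨j, List.mem_cons_of_mem _ hj, rfl⟩

lemma pvSieve_mem {n : Int} (hn : 2 ≤ n) {p : Int} (hp : p ∈ pvSieve n) :
    0 ≤ p ∧ p < n := by
  rw [pvSieve, if_neg (by omega)] at hp
  rcases pvSieve_mem_aux n.toNat _ _ _ hp with h | ⟨i, hi, rfl⟩
  · simp at h
  · rw [List.mem_range'_1] at hi
    have hN : 2 ≤ n.toNat := by omega
    have : i < n.toNat := by omega
    constructor
    · exact_mod_cast Int.natCast_nonneg i
    · calc (i : Int) < (n.toNat : Int) := by exact_mod_cast this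
        _ = n := Int.toNat_of_nonneg (by omega)

lemma pvScan_build (l : List Int) :
    ∀ (acc : List Int),
      l.foldl (fun acc p => acc ++ [acc.getLast! + p]) acc = acc ++ pvScan acc.getLast! l := by
  induction l with
  | nil => intro acc; simp [pvScan]
  | cons p rest ih =>
    intro acc
    simp only [List.foldl_cons]
    rw [ih]
    have hlast : (acc ++ [acc.getLast! + p]).getLast! = acc.getLast! + p := by
      simp only [List.getLast!_eq_getLast?_getD, List.getLast?_append, List.getLast?_singleton,
        Option.some_or, Int.default_eq_zero, Option.getD_some]
    rw [hlast]
    simp [pvScan]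

lemma pvScan_getD (l : List Int) :
    ∀ (s : Int) (k : Nat), k ≤ l.length → (s :: pvScan s l).getD k 0 = s + (l.take k).sum := by
  induction l with
  | nil =>
    intro s k hk
    have : k = 0 := by simpa using hk
    subst this
    simp
  | cons p rest ih =>
    intro s k hk
    cases k with
    | zero => simp
    | succ k =>
      simp only [pvScan, List.getD_cons_succ, List.take_succ_cons, List.sum_cons]
      rw [ih (s + p) k (by simpa using hk)]
      ring

lemma pvW_succ {prms : List Int} {i c : Nat} (h : i + c < prms.length) :
    pvW prms i (c + 1) = pvW prms i c + prms.getD (i + c) 0 := by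
  unfold pvW
  rw [List.take_add_one, List.sum_append, List.getElem?_drop,
    List.getD_eq_getElem?_getD]
  have : prms[i + c]? = some prms[i + c] := List.getElem?_eq_getElem h
  rw [this]
  simp

lemma pvW_mono {prms : List Int} (hpos : ∀ p ∈ prms, 0 ≤ p) (i : Nat) {c c' : Nat} (h : c ≤ c') :
    pvW prms i c ≤ pvW prms i c' := by
  unfold pvW
  obtain ⟨d, rfl⟩ := Nat.exists_eq_add_of_le h
  rw [List.take_add, List.sum_append]
  have hnn : 0 ≤ ((((prms.drop i)).drop c).take d).sum := by
    apply List.sum_nonneg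
    intro x hx
    have hx1 : x ∈ (prms.drop i).drop c := List.take_subset _ _ hx
    have hx2 : x ∈ prms.drop i := List.drop_subset _ _ hx1
    exact hpos x (List.drop_subset _ _ hx2)
  omega

lemma pvS_window {prms S : List Int}
    (hS : ∀ k, k ≤ prms.length → S.getD k 0 = (prms.take k).sum)
    {i c : Nat} (h : i + c ≤ prms.length) :
    S.getD (i + c) 0 - S.getD i 0 = pvW prms i c := by
  rw [hS _ h, hS _ (le_trans (Nat.le_add_right i c) h), List.take_add, List.sum_append]
  unfold pvW
  ring

-- lockstep: both loops from the same length c (A's state already caught up to num ≤ c)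
lemma pvLockstep (n : Int) (prms S : List Int) (pset : PySem.Set Int)
    (hpos : ∀ p ∈ prms, 0 ≤ p)
    (hlt : ∀ t : Int, t ∈ pset → t < n)
    (hS : ∀ k, k ≤ prms.length → S.getD k 0 = (prms.take k).sum)
    (i : Nat) :
    ∀ (fA c : Nat) (prm : Int) (num : Nat) (fB : Nat),
      num ≤ c → prms.length + 2 - c ≤ fA → 2 ≤ fA →
      prms.length + 1 - c ≤ fB → 1 ≤ fB →
      pvInnerA n prms pset i fA (pvW prms i c) c prm num
        = pvInnerB n prms.length S pset i fB (c + 1) prm num := by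
  intro fA
  induction fA with
  | zero => intro c prm num fB h1 h2 h3 h4 h5; omega
  | succ fA ih =>
    intro c prm num fB hnum hfA hfA2 hfB hfB1
    obtain ⟨fB', rfl⟩ : ∃ k, fB = k + 1 := ⟨fB - 1, by omega⟩
    rw [pvInnerA]
    by_cases hW : pvW prms i c < n
    · rw [if_pos hW]
      by_cases hL : prms.length ≤ i + c
      · rw [if_pos hL]
        obtain ⟨fA', rfl⟩ : ∃ k, fA = k + 1 := ⟨fA - 1, by omega⟩
        have hg : ¬(i + (c + 1) ≤ prms.length ∧
            S.getD (i + (c + 1)) 0 - S.getD i 0 < n) := by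
          rintro ⟨h1, -⟩; omega
        rw [pvInnerA, if_neg (lt_irrefl n), pvInnerB, if_neg hg]
      · rw [if_neg hL]
        push Not at hL
        have hWs : pvW prms i c + prms.getD (i + c) 0 = pvW prms i (c + 1) :=
          (pvW_succ hL).symm
        simp only [hWs]
        have hiB : i + (c + 1) ≤ prms.length := by omega
        have hSd : S.getD (i + (c + 1)) 0 - S.getD i 0 = pvW prms i (c + 1) :=
          pvS_window hS hiB
        by_cases hmem : pvW prms i (c + 1) ∈ pset
        · rw [if_pos ⟨by omega, hmem⟩, pvInnerB, hSd, if_pos ⟨hiB, hlt _ hmem⟩, if_pos hmem]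
          exact ih (c + 1) _ (c + 1) fB' (le_refl _) (by omega) (by omega) (by omega) (by omega)
        · rw [if_neg (fun h => hmem h.2)]
          by_cases hn2 : pvW prms i (c + 1) < n
          · rw [pvInnerB, hSd, if_pos ⟨hiB, hn2⟩, if_neg hmem]
            exact ih (c + 1) prm num fB' (by omega) (by omega) (by omega) (by omega) (by omega)
          · obtain ⟨fA', rfl⟩ : ∃ k, fA = k + 1 := ⟨fA - 1, by omega⟩
            rw [pvInnerA, if_neg hn2, pvInnerB, hSd, if_neg (fun h => hn2 h.2)]
    · rw [if_neg hW]
      have hg : ¬(i + (c + 1) ≤ prms.length ∧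
          S.getD (i + (c + 1)) 0 - S.getD i 0 < n) := by
        rintro ⟨h1, h2⟩
        rw [pvS_window hS h1] at h2
        exact hW (lt_of_le_of_lt (pvW_mono hpos i (Nat.le_succ c)) h2)
      rw [pvInnerB, if_neg hg]

-- phase 1: A walks lengths 1..num without updates; B starts directly at num+1
lemma pvPhase1 (n : Int) (prms S : List Int) (pset : PySem.Set Int)
    (hpos : ∀ p ∈ prms, 0 ≤ p)
    (hlt : ∀ t : Int, t ∈ pset → t < n)
    (hS : ∀ k, k ≤ prms.length → S.getD k 0 = (prms.take k).sum)
    (i : Nat) :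
    ∀ (fA c : Nat) (prm : Int) (num : Nat) (fB : Nat),
      c ≤ num → prms.length + 2 - c ≤ fA → 2 ≤ fA →
      prms.length + 1 - num ≤ fB → 1 ≤ fB →
      pvInnerA n prms pset i fA (pvW prms i c) c prm num
        = pvInnerB n prms.length S pset i fB (num + 1) prm num := by
  intro fA
  induction fA with
  | zero => intro c prm num fB h1 h2 h3 h4 h5; omega
  | succ fA ih =>
    intro c prm num fB hc hfA hfA2 hfB hfB1
    rcases eq_or_lt_of_le hc with rfl | hlt2
    · exact pvLockstep n prms S pset hpos hlt hS i (fA + 1) c prm c fB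
        (le_refl c) hfA hfA2 hfB hfB1
    · obtain ⟨fB', rfl⟩ : ∃ k, fB = k + 1 := ⟨fB - 1, by omega⟩
      rw [pvInnerA]
      by_cases hW : pvW prms i c < n
      · rw [if_pos hW]
        by_cases hL : prms.length ≤ i + c
        · rw [if_pos hL]
          obtain ⟨fA', rfl⟩ : ∃ k, fA = k + 1 := ⟨fA - 1, by omega⟩
          have hg : ¬(i + (num + 1) ≤ prms.length ∧
              S.getD (i + (num + 1)) 0 - S.getD i 0 < n) := by
            rintro ⟨h1, -⟩; omega
          rw [pvInnerA, if_neg (lt_irrefl n), pvInnerB, if_neg hg]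
        · rw [if_neg hL]
          push Not at hL
          have hWs : pvW prms i c + prms.getD (i + c) 0 = pvW prms i (c + 1) :=
            (pvW_succ hL).symm
          simp only [hWs]
          rw [if_neg (fun h => by omega)]
          exact ih (c + 1) prm num (fB' + 1) (by omega) (by omega) (by omega) (by omega) (by omega)
      · rw [if_neg hW]
        have hg : ¬(i + (num + 1) ≤ prms.length ∧
            S.getD (i + (num + 1)) 0 - S.getD i 0 < n) := by
          rintro ⟨h1, h2⟩
          rw [pvS_window hS h1] at h2
          exact hW (lt_of_le_of_lt (pvW_mono hpos i (by omega)) h2)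
        rw [pvInnerB, if_neg hg]

lemma pvInner_eq (n : Int) (prms S : List Int) (pset : PySem.Set Int)
    (hpos : ∀ p ∈ prms, 0 ≤ p)
    (hlt : ∀ t : Int, t ∈ pset → t < n)
    (hS : ∀ k, k ≤ prms.length → S.getD k 0 = (prms.take k).sum)
    (i : Nat) (prm : Int) (num : Nat) :
    pvInnerA n prms pset i (prms.length + 2) 0 0 prm num
      = pvInnerB n prms.length S pset i (prms.length + 2) (num + 1) prm num := by
  rw [show (0 : Int) = pvW prms i 0 from by simp [pvW]]
  exact pvPhase1 n prms S pset hpos hlt hS i (prms.length + 2) 0 prm num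
    (prms.length + 2) (Nat.zero_le _) (by omega) (by omega) (by omega) (by omega)

-- ===== VERDICT (by name: the statement is the Claim_ definition above) =====
theorem sum_of_most_primes_spec : Claim_equal_sum_of_most_primes := by
  intro n hdom hpre
  have hn : (2 : Int) ≤ n := hpre
  unfold Spec_sum_of_most_primes sum_of_most_primes sum_of_most_primes_alt
  rw [if_neg (by omega), if_neg (by omega)]
  have hpos : ∀ p ∈ pvSieve n, 0 ≤ p := fun p hp => (pvSieve_mem hn hp).1
  have hlt : ∀ t : Int, t ∈ PySem.Set.ofList (pvSieve n) → t < n := fun t ht =>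
    (pvSieve_mem hn ((PySem.Set.mem_ofList _ _).1 ht)).2
  have hS : ∀ k, k ≤ (pvSieve n).length →
      ((pvSieve n).foldl (fun acc p => acc ++ [acc.getLast! + p]) [0]).getD k 0
        = ((pvSieve n).take k).sum := by
    intro k hk
    rw [pvScan_build (pvSieve n) [0]]
    have h0 : (([(0 : Int)]).getLast!) = 0 := rfl
    rw [h0]
    have : ([(0 : Int)]) ++ pvScan 0 (pvSieve n) = 0 :: pvScan 0 (pvSieve n) := rfl
    rw [this, pvScan_getD (pvSieve n) 0 k hk]
    omega
  refine congrArg Prod.fst ?_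
  refine List.foldl_ext _ _ _ ?_
  intro st k hk
  exact pvInner_eq n (pvSieve n) _ _ hpos hlt hS k st.1 st.2
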